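-- pv_equiv track=rewrite | github.com/HanaSabih/python-FCS-assignment2 | exercise4.py | find_extreme
-- ===== SOURCE A (Python) =====
-- def find_extreme(lst):
--     if not lst:
--         return "The list is empty."
--
--     max_v = lst[0]
--     max_idx = 0
--     min_v = lst[0]
--     min_idx = 0
--
--     for i, num in enumerate(lst):
--         if num > max_v:
--             max_v = num
--             max_idx = i
--         if num < min_v:
--             min_v = num
--             min_idx = i
--
--     max_res = f"The highest value in the list is {max_v} at index {max_idx}."
--     min_res = f"The lowest value in the list is {min_v} at index {min_idx}."
--
--     return max_res, min_res
-- ===== SOURCE B (Python) =====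
-- def find_extreme(lst):
--     if not lst:
--         return "The list is empty."
--
--     max_v = max(lst)
--     min_v = min(lst)
--     max_idx = lst.index(max_v)
--     min_idx = lst.index(min_v)
--
--     return (f"The highest value in the list is {max_v} at index {max_idx}.",
--             f"The lowest value in the list is {min_v} at index {min_idx}.")
-- ===== Notes on version B (the rewrite author's own statement) =====
-- stated objective: idiomatic
-- what changed: Replaces the single fused scan that threads four accumulators (running max/min and their indices) with two built-in reductions max(lst)/min(lst) plus two first-occurrence index lookups via list.index; equivalence rests on A's strict comparisons keeping the first extremal occurrence, which is exactly what max()/min() and .index() return.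
-- outside the precondition, e.g. on find_extreme([]): A returns 'The list is empty.', B returns 'The list is empty.'
import Mathlib
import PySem

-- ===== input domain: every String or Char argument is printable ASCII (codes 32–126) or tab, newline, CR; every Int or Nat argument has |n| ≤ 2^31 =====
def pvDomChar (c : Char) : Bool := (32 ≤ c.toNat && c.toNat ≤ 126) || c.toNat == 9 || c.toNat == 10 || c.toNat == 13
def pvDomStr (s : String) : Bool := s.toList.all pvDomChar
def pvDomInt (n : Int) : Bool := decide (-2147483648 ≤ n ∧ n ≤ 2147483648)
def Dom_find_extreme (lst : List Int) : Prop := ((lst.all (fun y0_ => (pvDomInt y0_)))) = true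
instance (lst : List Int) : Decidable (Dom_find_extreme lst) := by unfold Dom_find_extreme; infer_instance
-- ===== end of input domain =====

-- B replaces A's single fused four-accumulator scan with two reductions (max/min) plus two
-- first-occurrence index lookups; same cost, more idiomatic.


-- shared f-string helpers (both Pythons build these exact strings)
def pvHigh (v i : Int) : String :=
  "The highest value in the list is " ++ PySem.Int.toStr v ++ " at index " ++ PySem.Int.toStr i ++ "."
def pvLow (v i : Int) : String :=
  "The lowest value in the list is " ++ PySem.Int.toStr v ++ " at index " ++ PySem.Int.toStr i ++ "."

-- ===== PORT A =====
-- A's loop body: both ifs in order; the second compares against the min untouched by the first.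
def pvStep (s : Int × Int × Int × Int) (p : Int × Int) : Int × Int × Int × Int :=
  let s1 := if p.2 > s.1 then (p.2, p.1, s.2.2.1, s.2.2.2) else s
  if p.2 < s1.2.2.1 then (s1.1, s1.2.1, p.2, p.1) else s1

def find_extreme (lst : List Int) : String × String :=
  match lst with
  | [] => ("The list is empty.", "The list is empty.")  -- in Python A returns a bare string here (outside Pre_)
  | x :: _ =>
    let st := (PySem.List.enumerate lst 0).foldl pvStep (x, 0, x, 0)
    (pvHigh st.1 st.2.1, pvLow st.2.2.1 st.2.2.2)

-- ===== PORT B =====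
def find_extreme_alt (lst : List Int) : String × String :=
  if lst = [] then ("The list is empty.", "The list is empty.")  -- outside Pre_
  else
    let maxV := (PySem.List.max? lst (fun y => y)).getD 0
    let minV := (PySem.List.min? lst (fun y => y)).getD 0
    let maxI : Int := ((PySem.List.index? lst maxV).getD 0 : Nat)
    let minI : Int := ((PySem.List.index? lst minV).getD 0 : Nat)
    (pvHigh maxV maxI, pvLow minV minI)

-- ===== PRECONDITION & SPEC =====
-- Pre_ excludes only the empty list, on which A returns the bare string "The list is empty."
-- instead of a pair of strings (not a value of the declared return type String × String).
def Pre_find_extreme (lst : List Int) : Prop := lst ≠ []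
instance (lst : List Int) : Decidable (Pre_find_extreme lst) := by unfold Pre_find_extreme; infer_instance
def pvWitness_find_extreme : List Int := [3, 1, 4, 1, 5]
def Spec_find_extreme (lst : List Int) (out : String × String) : Prop := out = find_extreme_alt lst
instance (lst : List Int) (out : String × String) : Decidable (Spec_find_extreme lst out) := by unfold Spec_find_extreme; infer_instance

-- ===== CLAIM (what is proved, stated in full; the proofs are below) =====
def Claim_equal_find_extreme : Prop := ∀ (lst : List Int), Dom_find_extreme lst → Pre_find_extreme lst → Spec_find_extreme lst (find_extreme lst)

-- ===== LEMMAS AND PROOFS =====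

theorem foldl_max_mem (a : Int) (l : List Int) : l.foldl max a = a ∨ l.foldl max a ∈ l := by
  have h := PySem.List.max?_mem (xs := a :: l) (key := fun y => y)
    (m := l.foldl max a) (by rw [PySem.List.max?_id_cons])
  simpa using h

theorem foldl_min_mem (a : Int) (l : List Int) : l.foldl min a = a ∨ l.foldl min a ∈ l := by
  have h := PySem.List.min?_mem (xs := a :: l) (key := fun y => y)
    (m := l.foldl min a) (by rw [PySem.List.min?_id_cons])
  simpa using h

theorem le_foldl_max' (a : Int) (l : List Int) : a ≤ l.foldl max a := by
  induction l generalizing a with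
  | nil => simp
  | cons y ys ih => exact le_trans (le_max_left a y) (ih _)

theorem foldl_min_le' (a : Int) (l : List Int) : l.foldl min a ≤ a := by
  induction l generalizing a with
  | nil => simp
  | cons y ys ih => exact le_trans (ih _) (min_le_left a y)

-- index bookkeeping for the max component when the head strictly improves the running max
theorem idxmax_gt (y i mv mi : Int) (ys : List Int) (hy : mv < y) :
    (if ys.foldl max y = y then i
       else (i + 1) + (((PySem.List.index? ys (ys.foldl max y)).getD 0 : Nat) : Int))
    = if ys.foldl max y = mv then mi
        else i + (((PySem.List.index? (y :: ys) (ys.foldl max y)).getD 0 : Nat) : Int) := by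
  have hyF : y ≤ ys.foldl max y := le_foldl_max' y ys
  have hne : ys.foldl max y ≠ mv := by omega
  rw [if_neg hne]
  by_cases hF : ys.foldl max y = y
  · rw [if_pos hF, hF, PySem.List.index?_cons_self]
    simp
  · rw [if_neg hF, PySem.List.index?_cons_of_ne _ (fun h => hF h.symm)]
    have hmem : ys.foldl max y ∈ ys := (foldl_max_mem y ys).resolve_left hF
    obtain ⟨k, hk⟩ := Option.isSome_iff_exists.mp ((PySem.List.index?_isSome_iff _ _).mpr hmem)
    rw [hk]
    simp
    omega

-- index bookkeeping for the max component when the head does not improve the running max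
theorem idxmax_le (y i mv mi : Int) (ys : List Int) (hy : y ≤ mv) :
    (if ys.foldl max mv = mv then mi
       else (i + 1) + (((PySem.List.index? ys (ys.foldl max mv)).getD 0 : Nat) : Int))
    = if ys.foldl max mv = mv then mi
        else i + (((PySem.List.index? (y :: ys) (ys.foldl max mv)).getD 0 : Nat) : Int) := by
  by_cases hF : ys.foldl max mv = mv
  · rw [if_pos hF, if_pos hF]
  · rw [if_neg hF, if_neg hF]
    have hmvF : mv ≤ ys.foldl max mv := le_foldl_max' mv ys
    have hyne : y ≠ ys.foldl max mv := by intro h; apply hF; omega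
    rw [PySem.List.index?_cons_of_ne _ hyne]
    have hmem : ys.foldl max mv ∈ ys := (foldl_max_mem mv ys).resolve_left hF
    obtain ⟨k, hk⟩ := Option.isSome_iff_exists.mp ((PySem.List.index?_isSome_iff _ _).mpr hmem)
    rw [hk]
    simp
    omega

-- the two mirror lemmas for the min component
theorem idxmin_lt (y i nv ni : Int) (ys : List Int) (hy : y < nv) :
    (if ys.foldl min y = y then i
       else (i + 1) + (((PySem.List.index? ys (ys.foldl min y)).getD 0 : Nat) : Int))
    = if ys.foldl min y = nv then ni
        else i + (((PySem.List.index? (y :: ys) (ys.foldl min y)).getD 0 : Nat) : Int) := by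
  have hyF : ys.foldl min y ≤ y := foldl_min_le' y ys
  have hne : ys.foldl min y ≠ nv := by omega
  rw [if_neg hne]
  by_cases hF : ys.foldl min y = y
  · rw [if_pos hF, hF, PySem.List.index?_cons_self]
    simp
  · rw [if_neg hF, PySem.List.index?_cons_of_ne _ (fun h => hF h.symm)]
    have hmem : ys.foldl min y ∈ ys := (foldl_min_mem y ys).resolve_left hF
    obtain ⟨k, hk⟩ := Option.isSome_iff_exists.mp ((PySem.List.index?_isSome_iff _ _).mpr hmem)
    rw [hk]
    simp
    omega

theorem idxmin_ge (y i nv ni : Int) (ys : List Int) (hy : nv ≤ y) :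
    (if ys.foldl min nv = nv then ni
       else (i + 1) + (((PySem.List.index? ys (ys.foldl min nv)).getD 0 : Nat) : Int))
    = if ys.foldl min nv = nv then ni
        else i + (((PySem.List.index? (y :: ys) (ys.foldl min nv)).getD 0 : Nat) : Int) := by
  by_cases hF : ys.foldl min nv = nv
  · rw [if_pos hF, if_pos hF]
  · rw [if_neg hF, if_neg hF]
    have hFnv : ys.foldl min nv ≤ nv := foldl_min_le' nv ys
    have hyne : y ≠ ys.foldl min nv := by intro h; apply hF; omega
    rw [PySem.List.index?_cons_of_ne _ hyne]
    have hmem : ys.foldl min nv ∈ ys := (foldl_min_mem nv ys).resolve_left hF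
    obtain ⟨k, hk⟩ := Option.isSome_iff_exists.mp ((PySem.List.index?_isSome_iff _ _).mpr hmem)
    rw [hk]
    simp
    omega

-- the invariant of A's loop, with fully general accumulator and start index
theorem loop_spec (xs : List Int) (i mv mi nv ni : Int) :
    (PySem.List.enumerate xs i).foldl pvStep (mv, mi, nv, ni) =
      (xs.foldl max mv,
       if xs.foldl max mv = mv then mi
         else i + (((PySem.List.index? xs (xs.foldl max mv)).getD 0 : Nat) : Int),
       xs.foldl min nv,
       if xs.foldl min nv = nv then ni
         else i + (((PySem.List.index? xs (xs.foldl min nv)).getD 0 : Nat) : Int)) := by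
  induction xs generalizing i mv mi nv ni with
  | nil => simp [PySem.List.enumerate_nil]
  | cons y ys ih =>
    rw [PySem.List.enumerate_cons, List.foldl_cons, ih]
    by_cases hy : y > mv <;> by_cases hz : y < nv <;>
      simp only [pvStep, hy, hz, if_pos, if_neg, if_true, if_false, ite_true, ite_false, List.foldl_cons]
    · -- y > mv, y < nv : new state (y, i, y, i)
      rw [max_eq_right (le_of_lt hy), min_eq_right (le_of_lt hz)]
      exact Prod.ext rfl (Prod.ext (idxmax_gt y i mv mi ys hy)
        (Prod.ext rfl (idxmin_lt y i nv ni ys hz)))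
    · -- y > mv, ¬ y < nv : new state (y, i, nv, ni)
      rw [max_eq_right (le_of_lt hy), min_eq_left (by omega)]
      exact Prod.ext rfl (Prod.ext (idxmax_gt y i mv mi ys hy)
        (Prod.ext rfl (idxmin_ge y i nv ni ys (by omega))))
    · -- ¬ y > mv, y < nv : new state (mv, mi, y, i)
      rw [max_eq_left (by omega), min_eq_right (le_of_lt hz)]
      exact Prod.ext rfl (Prod.ext (idxmax_le y i mv mi ys (by omega))
        (Prod.ext rfl (idxmin_lt y i nv ni ys hz)))
    · -- ¬ y > mv, ¬ y < nv : state unchanged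
      rw [max_eq_left (by omega), min_eq_left (by omega)]
      exact Prod.ext rfl (Prod.ext (idxmax_le y i mv mi ys (by omega))
        (Prod.ext rfl (idxmin_ge y i nv ni ys (by omega))))

-- ===== VERDICT (by name: the statement is the Claim_ definition above) =====
theorem find_extreme_spec : Claim_equal_find_extreme := by
  intro lst _ hpre
  unfold Spec_find_extreme
  match lst with
  | [] => exact absurd rfl hpre
  | x :: xs =>
    rw [find_extreme, find_extreme_alt]
    rw [if_neg (by simp)]
    simp only [loop_spec, PySem.List.max?_id_cons, PySem.List.min?_id_cons, Option.getD_some]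
    have hfmax : (x :: xs).foldl max x = xs.foldl max x := by simp
    have hfmin : (x :: xs).foldl min x = xs.foldl min x := by simp
    rw [hfmax, hfmin]
    congr 1
    · -- max string
      by_cases hM : xs.foldl max x = x
      · rw [if_pos hM, hM, PySem.List.index?_cons_self]
        simp [pvHigh]
      · rw [if_neg hM]
        simp [pvHigh]
    · -- min string
      by_cases hm : xs.foldl min x = x
      · rw [if_pos hm, hm, PySem.List.index?_cons_self]
        simp [pvLow]
      · rw [if_neg hm]
        simp [pvLow]
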